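-- pv_equiv track=rewrite | github.com/MahmoudOsama97/TheLoginCheckerProblem | src/utils.py | mmh3_hash
-- ===== SOURCE A (Python) =====
-- def mmh3_hash(s, m, seed=0):
--     """
--     A basic implementation of MurmurHash3 (32-bit version) for demonstration.
--
--     Args:
--         s (str): The string to hash.
--         m (int): The size of the hash table or bit array.
--         seed (int): Seed for the hash function
--
--     Returns:
--         int: The hash value (an index between 0 and m-1).
--     """
--     def fmix32(h):
--         h ^= h >> 16
--         h = (h * 0x85ebca6b) & 0xFFFFFFFF
--         h ^= h >> 13
--         h = (h * 0xc2b2ae35) & 0xFFFFFFFF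
--         h ^= h >> 16
--         return h
--
--     length = len(s)
--     n_blocks = int(length / 4)
--
--     h1 = seed
--
--     c1 = 0xcc9e2d51
--     c2 = 0x1b873593
--
--     # body
--     for block_start in range(0, n_blocks * 4, 4):
--         # little endian
--         k1 = ord(s[block_start + 3]) << 24 | \
--             ord(s[block_start + 2]) << 16 | \
--             ord(s[block_start + 1]) << 8 | \
--             ord(s[block_start + 0])
--
--         k1 = (c1 * k1) & 0xFFFFFFFF
--         k1 = (k1 << 15 | k1 >> 17) & 0xFFFFFFFF  # inlined ROTL32
--         k1 = (c2 * k1) & 0xFFFFFFFF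
--
--         h1 ^= k1
--         h1 = (h1 << 13 | h1 >> 19) & 0xFFFFFFFF  # inlined ROTL32
--         h1 = (h1 * 5 + 0xe6546b64) & 0xFFFFFFFF
--
--     # tail
--     tail_index = n_blocks * 4
--     k1 = 0
--     tail_size = length & 3
--
--     if tail_size >= 3:
--         k1 ^= ord(s[tail_index + 2]) << 16
--     if tail_size >= 2:
--         k1 ^= ord(s[tail_index + 1]) << 8
--     if tail_size >= 1:
--         k1 ^= ord(s[tail_index + 0])
--
--     if tail_size > 0:
--         k1 = (k1 * c1) & 0xFFFFFFFF
--         k1 = (k1 << 15 | k1 >> 17) & 0xFFFFFFFF  # inlined ROTL32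
--         k1 = (k1 * c2) & 0xFFFFFFFF
--         h1 ^= k1
--
--     # finalization
--     unsigned_val = fmix32(h1 ^ length)
--     return unsigned_val % m
-- ===== SOURCE B (Python) =====
-- def mmh3_hash(s, m, seed=0):
--     """Streaming MurmurHash3-32: one pass over the characters with a running
--     4-byte accumulator, instead of indexed block loop + separate tail reads."""
--     M = 0xFFFFFFFF
--
--     def mix(k):
--         k = (k * 0xcc9e2d51) & M
--         k = (k << 15 | k >> 17) & M
--         return (k * 0x1b873593) & M
--
--     h1 = seed
--     k1 = 0
--     p = 0
--     for ch in s: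
--         k1 |= ord(ch) << (8 * p)
--         p += 1
--         if p == 4:
--             h1 ^= mix(k1)
--             h1 = (h1 << 13 | h1 >> 19) & M
--             h1 = (h1 * 5 + 0xe6546b64) & M
--             k1 = 0
--             p = 0
--     if p:
--         h1 ^= mix(k1)
--     h1 ^= len(s)
--     h1 ^= h1 >> 16
--     h1 = (h1 * 0x85ebca6b) & M
--     h1 ^= h1 >> 13
--     h1 = (h1 * 0xc2b2ae35) & M
--     h1 ^= h1 >> 16
--     return h1 % m
-- ===== Notes on version B (the rewrite author's own statement) =====
-- stated objective: alternative
-- what changed: Replaces A's indexed block loop (range over block starts with 4 explicit reads) plus separate tail reads by a single streaming pass over the characters that keeps a running little-endian 4-byte accumulator and byte counter, mixing into h1 at every 4th byte and once more for leftover bytes.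
import Mathlib
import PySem

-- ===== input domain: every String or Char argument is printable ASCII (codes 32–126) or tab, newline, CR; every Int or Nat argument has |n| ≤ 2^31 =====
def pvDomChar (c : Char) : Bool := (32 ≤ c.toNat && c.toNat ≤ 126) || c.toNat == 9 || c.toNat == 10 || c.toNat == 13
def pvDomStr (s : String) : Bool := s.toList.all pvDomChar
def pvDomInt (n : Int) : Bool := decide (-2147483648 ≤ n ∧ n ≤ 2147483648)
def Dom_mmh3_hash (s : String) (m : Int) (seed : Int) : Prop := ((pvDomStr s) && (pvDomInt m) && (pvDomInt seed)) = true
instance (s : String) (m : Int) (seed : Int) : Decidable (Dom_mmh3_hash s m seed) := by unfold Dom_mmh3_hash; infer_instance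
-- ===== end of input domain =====

-- B re-implements the hash as ONE streaming pass over the characters (running 4-byte
-- little-endian accumulator, mixed into h1 at every 4th byte) instead of A's indexed
-- block loop plus separate tail reads; objective: alternative decomposition, same value.

-- ===== PORT A =====
-- ord(s[i]) for an index A only evaluates in range (the .getD 0 default is never reached)
def pvOrdAt (l : List Char) (i : Int) : Int :=
  ((PySem.List.pyGet? l i).map (fun c => (c.toNat : Int))).getD 0

def mmh3_hash (s : String) (m : Int) (seed : Int) : Int :=
  let l := s.toList
  let length : Int := (l.length : Int)
  -- int(length / 4): length ≥ 0, so this is floor division length // 4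
  let n_blocks : Int := PySem.Int.floordiv length 4
  -- body: for block_start in range(0, n_blocks * 4, 4)
  let h1 := (PySem.List.pyRange 0 (n_blocks * 4) 4).foldl (fun h1 bs =>
    let k1 := PySem.Int.bor (PySem.Int.bor (PySem.Int.bor
                (pvOrdAt l (bs + 3) <<< (24 : Nat)) (pvOrdAt l (bs + 2) <<< (16 : Nat)))
                (pvOrdAt l (bs + 1) <<< (8 : Nat))) (pvOrdAt l (bs + 0))
    let k1 := PySem.Int.band (0xcc9e2d51 * k1) 0xFFFFFFFF
    let k1 := PySem.Int.band (PySem.Int.bor (k1 <<< (15 : Nat)) (k1 >>> (17 : Nat))) 0xFFFFFFFF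
    let k1 := PySem.Int.band (0x1b873593 * k1) 0xFFFFFFFF
    let h1 := PySem.Int.bxor h1 k1
    let h1 := PySem.Int.band (PySem.Int.bor (h1 <<< (13 : Nat)) (h1 >>> (19 : Nat))) 0xFFFFFFFF
    PySem.Int.band (h1 * 5 + 0xe6546b64) 0xFFFFFFFF) seed
  -- tail
  let tail_index : Int := n_blocks * 4
  let k1 : Int := 0
  let tail_size : Int := PySem.Int.band length 3
  let k1 := if tail_size ≥ 3 then PySem.Int.bxor k1 (pvOrdAt l (tail_index + 2) <<< (16 : Nat)) else k1
  let k1 := if tail_size ≥ 2 then PySem.Int.bxor k1 (pvOrdAt l (tail_index + 1) <<< (8 : Nat)) else k1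
  let k1 := if tail_size ≥ 1 then PySem.Int.bxor k1 (pvOrdAt l (tail_index + 0)) else k1
  let h1 := if tail_size > 0 then
      let k1 := PySem.Int.band (k1 * 0xcc9e2d51) 0xFFFFFFFF
      let k1 := PySem.Int.band (PySem.Int.bor (k1 <<< (15 : Nat)) (k1 >>> (17 : Nat))) 0xFFFFFFFF
      let k1 := PySem.Int.band (k1 * 0x1b873593) 0xFFFFFFFF
      PySem.Int.bxor h1 k1
    else h1
  -- finalization: fmix32(h1 ^ length)
  let h := PySem.Int.bxor h1 length
  let h := PySem.Int.bxor h (h >>> (16 : Nat))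
  let h := PySem.Int.band (h * 0x85ebca6b) 0xFFFFFFFF
  let h := PySem.Int.bxor h (h >>> (13 : Nat))
  let h := PySem.Int.band (h * 0xc2b2ae35) 0xFFFFFFFF
  let h := PySem.Int.bxor h (h >>> (16 : Nat))
  PySem.Int.mod h m

-- ===== PORT B =====
-- Source B's local helper mix(k)
def pvMixB (k : Int) : Int :=
  let k := PySem.Int.band (k * 0xcc9e2d51) 0xFFFFFFFF
  let k := PySem.Int.band (PySem.Int.bor (k <<< (15 : Nat)) (k >>> (17 : Nat))) 0xFFFFFFFF
  PySem.Int.band (k * 0x1b873593) 0xFFFFFFFF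

-- one iteration of Source B's `for ch in s` loop over the state (h1, k1, p)
-- (p counts the bytes 0..3 of the current block, so it is a Nat and 8 * p the Nat shift amount)
def pvStep (st : Int × Int × Nat) (ch : Char) : Int × Int × Nat :=
  let k1 := PySem.Int.bor st.2.1 ((ch.toNat : Int) <<< (8 * st.2.2))
  let p := st.2.2 + 1
  if p = 4 then
    let h1 := PySem.Int.bxor st.1 (pvMixB k1)
    let h1 := PySem.Int.band (PySem.Int.bor (h1 <<< (13 : Nat)) (h1 >>> (19 : Nat))) 0xFFFFFFFF
    let h1 := PySem.Int.band (h1 * 5 + 0xe6546b64) 0xFFFFFFFF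
    (h1, 0, 0)
  else
    (st.1, k1, p)

def mmh3_hash_alt (s : String) (m : Int) (seed : Int) : Int :=
  let st := s.toList.foldl pvStep (seed, 0, 0)
  let h1 := if st.2.2 ≠ 0 then PySem.Int.bxor st.1 (pvMixB st.2.1) else st.1
  let h1 := PySem.Int.bxor h1 (s.toList.length : Int)
  let h1 := PySem.Int.bxor h1 (h1 >>> (16 : Nat))
  let h1 := PySem.Int.band (h1 * 0x85ebca6b) 0xFFFFFFFF
  let h1 := PySem.Int.bxor h1 (h1 >>> (13 : Nat))
  let h1 := PySem.Int.band (h1 * 0xc2b2ae35) 0xFFFFFFFF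
  let h1 := PySem.Int.bxor h1 (h1 >>> (16 : Nat))
  PySem.Int.mod h1 m

-- ===== PRECONDITION & SPEC =====
-- Pre_ excludes only m = 0, on which A's final `% m` raises ZeroDivisionError.
def Pre_mmh3_hash (s : String) (m : Int) (seed : Int) : Prop := m ≠ 0
instance (s : String) (m : Int) (seed : Int) : Decidable (Pre_mmh3_hash s m seed) := by
  unfold Pre_mmh3_hash; infer_instance

def pvWitness_mmh3_hash : String × Int × Int := ("abcde", 97, 0)

def Spec_mmh3_hash (s : String) (m : Int) (seed : Int) (out : Int) : Prop := out = mmh3_hash_alt s m seed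
instance (s : String) (m : Int) (seed : Int) (out : Int) : Decidable (Spec_mmh3_hash s m seed out) := by
  unfold Spec_mmh3_hash; infer_instance

-- ===== CLAIM (what is proved, stated in full; the proofs are below) =====
def Claim_equal_mmh3_hash : Prop := ∀ (s : String) (m : Int) (seed : Int), Dom_mmh3_hash s m seed → Pre_mmh3_hash s m seed → Spec_mmh3_hash s m seed (mmh3_hash s m seed)

-- ===== LEMMAS AND PROOFS =====

-- A's per-block body, named so the fold can be reasoned about
def pvBlockA (l : List Char) (h1 bs : Int) : Int :=
    let k1 := PySem.Int.bor (PySem.Int.bor (PySem.Int.bor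
                (pvOrdAt l (bs + 3) <<< (24 : Nat)) (pvOrdAt l (bs + 2) <<< (16 : Nat)))
                (pvOrdAt l (bs + 1) <<< (8 : Nat))) (pvOrdAt l (bs + 0))
    let k1 := PySem.Int.band (0xcc9e2d51 * k1) 0xFFFFFFFF
    let k1 := PySem.Int.band (PySem.Int.bor (k1 <<< (15 : Nat)) (k1 >>> (17 : Nat))) 0xFFFFFFFF
    let k1 := PySem.Int.band (0x1b873593 * k1) 0xFFFFFFFF
    let h1 := PySem.Int.bxor h1 k1
    let h1 := PySem.Int.band (PySem.Int.bor (h1 <<< (13 : Nat)) (h1 >>> (19 : Nat))) 0xFFFFFFFF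
    PySem.Int.band (h1 * 5 + 0xe6546b64) 0xFFFFFFFF

-- A's hash state before finalization, as a function of the character list
def pvCoreA (l : List Char) (h1 : Int) : Int :=
  let length : Int := (l.length : Int)
  let n_blocks : Int := PySem.Int.floordiv length 4
  let h1 := (PySem.List.pyRange 0 (n_blocks * 4) 4).foldl (pvBlockA l) h1
  let tail_index : Int := n_blocks * 4
  let k1 : Int := 0
  let tail_size : Int := PySem.Int.band length 3
  let k1 := if tail_size ≥ 3 then PySem.Int.bxor k1 (pvOrdAt l (tail_index + 2) <<< (16 : Nat)) else k1
  let k1 := if tail_size ≥ 2 then PySem.Int.bxor k1 (pvOrdAt l (tail_index + 1) <<< (8 : Nat)) else k1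
  let k1 := if tail_size ≥ 1 then PySem.Int.bxor k1 (pvOrdAt l (tail_index + 0)) else k1
  if tail_size > 0 then
      let k1 := PySem.Int.band (k1 * 0xcc9e2d51) 0xFFFFFFFF
      let k1 := PySem.Int.band (PySem.Int.bor (k1 <<< (15 : Nat)) (k1 >>> (17 : Nat))) 0xFFFFFFFF
      let k1 := PySem.Int.band (k1 * 0x1b873593) 0xFFFFFFFF
      PySem.Int.bxor h1 k1
    else h1

-- B's hash state before finalization
def pvCoreB (l : List Char) (h1 : Int) : Int :=
  let st := l.foldl pvStep (h1, 0, 0)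
  if st.2.2 ≠ 0 then PySem.Int.bxor st.1 (pvMixB st.2.1) else st.1

-- the shared finalization
def pvFinish (h1 len m : Int) : Int :=
  let h := PySem.Int.bxor h1 len
  let h := PySem.Int.bxor h (h >>> (16 : Nat))
  let h := PySem.Int.band (h * 0x85ebca6b) 0xFFFFFFFF
  let h := PySem.Int.bxor h (h >>> (13 : Nat))
  let h := PySem.Int.band (h * 0xc2b2ae35) 0xFFFFFFFF
  let h := PySem.Int.bxor h (h >>> (16 : Nat))
  PySem.Int.mod h m

theorem portA_eq (s : String) (m seed : Int) :
    mmh3_hash s m seed = pvFinish (pvCoreA s.toList seed) (s.toList.length : Int) m := by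
  unfold mmh3_hash pvFinish pvCoreA pvBlockA; rfl

theorem portB_eq (s : String) (m seed : Int) :
    mmh3_hash_alt s m seed = pvFinish (pvCoreB s.toList seed) (s.toList.length : Int) m := by
  unfold mmh3_hash_alt pvFinish pvCoreB; rfl

-- the block mix applied to h1 (B's shape; A's inlined block mix differs only by `c1 * k1` vs `k1 * c1`)
def pvHStep (h1 k1 : Int) : Int :=
  let h1 := PySem.Int.bxor h1 (pvMixB k1)
  let h1 := PySem.Int.band (PySem.Int.bor (h1 <<< (13 : Nat)) (h1 >>> (19 : Nat))) 0xFFFFFFFF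
  PySem.Int.band (h1 * 5 + 0xe6546b64) 0xFFFFFFFF

-- ord at a Nat index, Nat-valued
def pvOrdN (l : List Char) (n : Nat) : Nat := ((l[n]?).map Char.toNat).getD 0

theorem pvOrdAt_natCast (l : List Char) (n : Nat) : pvOrdAt l (n : Int) = (pvOrdN l n : Int) := by
  simp only [pvOrdAt, pvOrdN, PySem.List.pyGet?_natCast]
  cases l[n]? <;> simp

theorem pvOrdAt_zero_cons (x : Char) (xs : List Char) : pvOrdAt (x :: xs) 0 = (x.toNat : Int) := by
  simp [pvOrdAt]

theorem pvBor0 (x : Int) : PySem.Int.bor 0 x = x := by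
  rw [PySem.Int.bor_comm]; exact PySem.Int.bor_zero x

theorem pvBxor0 (x : Int) : PySem.Int.bxor 0 x = x := by
  rw [PySem.Int.bxor_comm]; exact PySem.Int.bxor_zero x

theorem pvShlCast (m k : Nat) : ((m : Int) <<< k) = ((m <<< k : Nat) : Int) := rfl

theorem pvXorOr (x y k : Nat) (hy : y < 2 ^ k) : (x <<< k) ^^^ y = (x <<< k) ||| y := by
  apply Nat.eq_of_testBit_eq
  intro i
  by_cases hik : k ≤ i
  · have hyb : y.testBit i = false :=
      Nat.testBit_lt_two_pow (lt_of_lt_of_le hy (Nat.pow_le_pow_right (by norm_num) hik))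
    simp [Nat.testBit_xor, hyb]
  · have hsb : (x <<< k).testBit i = false := by
      simp [Nat.testBit_shiftLeft, hik]
    simp [Nat.testBit_xor, hsb]

theorem pvTail2 (a b : Nat) (ha : a < 256) : (b <<< 8) ^^^ a = a ||| b <<< 8 := by
  rw [pvXorOr b a 8 (by omega), Nat.lor_comm]

theorem pvSplit16 (c b : Nat) : c <<< 16 ||| b <<< 8 = (c <<< 8 ||| b) <<< 8 := by
  rw [Nat.shiftLeft_or_distrib, ← Nat.shiftLeft_add]

theorem pvTail3 (a b c : Nat) (ha : a < 256) (hb : b < 256) :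
    c <<< 16 ^^^ b <<< 8 ^^^ a = a ||| b <<< 8 ||| c <<< 16 := by
  have h8 : b <<< 8 < 2 ^ 16 := by rw [Nat.shiftLeft_eq]; norm_num; omega
  rw [pvXorOr c (b <<< 8) 16 h8, pvSplit16,
    pvXorOr (c <<< 8 ||| b) a 8 (by omega), ← pvSplit16]
  simp [Nat.lor_comm, Nat.lor_assoc]

theorem pvBlockNat (a b c d : Nat) :
    d <<< 24 ||| c <<< 16 ||| b <<< 8 ||| a = a ||| b <<< 8 ||| c <<< 16 ||| d <<< 24 := by
  simp [Nat.lor_comm, Nat.lor_assoc]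

theorem pvTail2I (a b : Char) (ha : a.toNat < 256) :
    PySem.Int.bxor ((b.toNat : Int) <<< (8 : Nat)) (a.toNat : Int)
      = PySem.Int.bor (a.toNat : Int) ((b.toNat : Int) <<< (8 : Nat)) := by
  rw [pvShlCast, PySem.Int.bxor_natCast, PySem.Int.bor_natCast, pvTail2 _ _ ha]

theorem pvTail3I (a b c : Char) (ha : a.toNat < 256) (hb : b.toNat < 256) :
    PySem.Int.bxor (PySem.Int.bxor ((c.toNat : Int) <<< (16 : Nat)) ((b.toNat : Int) <<< (8 : Nat))) (a.toNat : Int)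
      = PySem.Int.bor (PySem.Int.bor (a.toNat : Int) ((b.toNat : Int) <<< (8 : Nat))) ((c.toNat : Int) <<< (16 : Nat)) := by
  rw [pvShlCast, pvShlCast, PySem.Int.bxor_natCast, PySem.Int.bxor_natCast,
    PySem.Int.bor_natCast, PySem.Int.bor_natCast, pvTail3 _ _ _ ha hb]

theorem pvBlockI (a b c d : Char) :
    PySem.Int.bor (PySem.Int.bor (PySem.Int.bor
      ((d.toNat : Int) <<< (24 : Nat)) ((c.toNat : Int) <<< (16 : Nat))) ((b.toNat : Int) <<< (8 : Nat))) (a.toNat : Int)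
      = PySem.Int.bor (PySem.Int.bor (PySem.Int.bor (a.toNat : Int)
      ((b.toNat : Int) <<< (8 : Nat))) ((c.toNat : Int) <<< (16 : Nat))) ((d.toNat : Int) <<< (24 : Nat)) := by
  rw [pvShlCast, pvShlCast, pvShlCast]
  rw [PySem.Int.bor_natCast, PySem.Int.bor_natCast, PySem.Int.bor_natCast,
    PySem.Int.bor_natCast, PySem.Int.bor_natCast, PySem.Int.bor_natCast, pvBlockNat]

theorem pvRange4 (n : Nat) :
    PySem.List.pyRange 0 ((n : Int) * 4) 4 = (List.range n).map (fun k => ((4 * k : Nat) : Int)) := by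
  rw [PySem.List.pyRange_of_pos 0 ((n : Int) * 4) (by norm_num)]
  rcases Nat.eq_zero_or_pos n with h | h
  · subst h; simp
  · have hlt : (0 : Int) < (n : Int) * 4 := by omega
    rw [if_pos hlt]
    have h4 : ((n : Int) * 4 - 0 + 4 - 1) / 4 = (n : Int) := by omega
    rw [h4]
    simp only [Int.toNat_natCast]
    refine List.map_congr_left ?_
    intro k _
    push_cast
    ring

theorem pvOrdN_add4 (a b c d : Char) (t : List Char) (n : Nat) :
    pvOrdN (a :: b :: c :: d :: t) (n + 4) = pvOrdN t n := rfl

theorem pvOrdAt_add4 (a b c d : Char) (t : List Char) (n : Nat) :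
    pvOrdAt (a :: b :: c :: d :: t) ((n + 4 : Nat) : Int) = pvOrdAt t (n : Int) := by
  rw [pvOrdAt_natCast, pvOrdAt_natCast, pvOrdN_add4]

theorem pvBlockA_shift (a b c d : Char) (t : List Char) (h : Int) (k : Nat) :
    pvBlockA (a :: b :: c :: d :: t) h ((4 * (k + 1) : Nat) : Int)
      = pvBlockA t h ((4 * k : Nat) : Int) := by
  unfold pvBlockA
  have e : ∀ j : Nat, ((4 * (k + 1) : Nat) : Int) + (j : Int) = ((4 * k + j + 4 : Nat) : Int) := by
    intro j; push_cast; ring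
  have e' : ∀ j : Nat, ((4 * k : Nat) : Int) + (j : Int) = ((4 * k + j : Nat) : Int) := by
    intro j; push_cast; ring
  have r : ∀ j : Nat, pvOrdAt (a :: b :: c :: d :: t) (((4 * (k + 1) : Nat) : Int) + (j : Int))
      = pvOrdAt t (((4 * k : Nat) : Int) + (j : Int)) := by
    intro j; rw [e j, e' j, pvOrdAt_add4]
  have r3 := r 3; have r2 := r 2; have r1 := r 1; have r0 := r 0
  norm_num at r3 r2 r1 r0
  norm_num [r3, r2, r1, r0]

theorem pvCoreA_cons4 (a b c d : Char) (t : List Char) (h1 : Int) :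
    pvCoreA (a :: b :: c :: d :: t) h1 =
      pvCoreA t (pvBlockA (a :: b :: c :: d :: t) h1 0) := by
  have hlen : (a :: b :: c :: d :: t).length = t.length + 4 := by simp
  have hfd : PySem.Int.floordiv (((t.length + 4 : Nat)) : Int) 4 = ((t.length / 4 + 1 : Nat) : Int) := by
    have := PySem.Int.floordiv_natCast (t.length + 4) 4
    rw [show (((4:Nat)):Int) = (4:Int) from rfl] at this
    rw [this, Nat.add_div_right _ (by norm_num)]
  have hts : PySem.Int.band (((t.length + 4 : Nat)) : Int) 3 = ((t.length % 4 : Nat) : Int) := by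
    have := PySem.Int.band_natCast (t.length + 4) 3
    rw [show (((3:Nat)):Int) = (3:Int) from rfl] at this
    rw [this, Nat.and_two_pow_sub_one_eq_mod (t.length + 4) 2, Nat.add_mod_right]
  have htsT : PySem.Int.band ((t.length : Nat) : Int) 3 = ((t.length % 4 : Nat) : Int) := by
    have := PySem.Int.band_natCast t.length 3
    rw [show (((3:Nat)):Int) = (3:Int) from rfl] at this
    rw [this, Nat.and_two_pow_sub_one_eq_mod t.length 2]
  have hfdT : PySem.Int.floordiv ((t.length : Nat) : Int) 4 = ((t.length / 4 : Nat) : Int) := by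
    have := PySem.Int.floordiv_natCast t.length 4
    rw [show (((4:Nat)):Int) = (4:Int) from rfl] at this
    rw [this]
  unfold pvCoreA
  simp only [hlen, hfd, hts, htsT, hfdT]
  rw [pvRange4 (t.length / 4 + 1), pvRange4 (t.length / 4)]
  rw [List.range_succ_eq_map, List.map_cons, List.foldl_cons]
  simp only [List.foldl_map]
  have h0 : ((4 * 0 : Nat) : Int) = 0 := by norm_num
  rw [h0]
  have hbody : (fun (h : Int) (k : Nat) => pvBlockA (a :: b :: c :: d :: t) h ((4 * (Nat.succ k) : Nat) : Int))
      = (fun (h : Int) (k : Nat) => pvBlockA t h ((4 * k : Nat) : Int)) := by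
    funext h k
    exact pvBlockA_shift a b c d t h k
  rw [hbody]
  have htail : ∀ j : Nat, pvOrdAt (a :: b :: c :: d :: t) (((t.length / 4 + 1 : Nat) : Int) * 4 + (j : Int))
      = pvOrdAt t (((t.length / 4 : Nat) : Int) * 4 + (j : Int)) := by
    intro j
    have e1 : ((t.length / 4 + 1 : Nat) : Int) * 4 + (j : Int) = ((4 * (t.length / 4) + j + 4 : Nat) : Int) := by
      push_cast; ring
    have e2 : ((t.length / 4 : Nat) : Int) * 4 + (j : Int) = ((4 * (t.length / 4) + j : Nat) : Int) := by
      push_cast; ring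
    rw [e1, e2, pvOrdAt_add4]
  have ht2 := htail 2; have ht1 := htail 1; have ht0 := htail 0
  norm_num at ht2 ht1 ht0 ⊢
  rw [ht2, ht1, ht0]

theorem pvCoreB_cons4 (a b c d : Char) (t : List Char) (h1 : Int) :
    pvCoreB (a :: b :: c :: d :: t) h1 =
      pvCoreB t (pvHStep h1
        (PySem.Int.bor (PySem.Int.bor (PySem.Int.bor (a.toNat : Int)
          ((b.toNat : Int) <<< (8 : Nat))) ((c.toNat : Int) <<< (16 : Nat)))
          ((d.toNat : Int) <<< (24 : Nat)))) := by
  simp [pvCoreB, pvStep, pvHStep, pvBor0]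

-- the first block of A equals B's mixed block word
theorem pvFirstBlock (a b c d : Char) (t : List Char) (h1 : Int) :
    pvBlockA (a :: b :: c :: d :: t) h1 0 =
      pvHStep h1
        (PySem.Int.bor (PySem.Int.bor (PySem.Int.bor (a.toNat : Int)
          ((b.toNat : Int) <<< (8 : Nat))) ((c.toNat : Int) <<< (16 : Nat)))
          ((d.toNat : Int) <<< (24 : Nat))) := by
  have ho1 : pvOrdAt (a :: b :: c :: d :: t) 1 = (b.toNat : Int) := by
    have h := pvOrdAt_natCast (a :: b :: c :: d :: t) 1
    simpa [pvOrdN] using h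
  have ho2 : pvOrdAt (a :: b :: c :: d :: t) 2 = (c.toNat : Int) := by
    have h := pvOrdAt_natCast (a :: b :: c :: d :: t) 2
    simpa [pvOrdN] using h
  have ho3 : pvOrdAt (a :: b :: c :: d :: t) 3 = (d.toNat : Int) := by
    have h := pvOrdAt_natCast (a :: b :: c :: d :: t) 3
    simpa [pvOrdN] using h
  simp [pvBlockA, pvHStep, pvMixB, pvOrdAt_zero_cons, ho1, ho2, ho3, pvBlockI, mul_comm]

theorem pvCore_eq : ∀ (l : List Char), (∀ c ∈ l, c.toNat < 256) → ∀ h1 : Int,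
    pvCoreA l h1 = pvCoreB l h1
  | [], _, h1 => by
    have hr : PySem.List.pyRange 0 0 4 = [] := by decide
    have hb : PySem.Int.band (0 : Int) 3 = 0 := by decide
    simp [pvCoreA, pvCoreB, hr, hb]
  | [a], _, h1 => by
    have hb : PySem.Int.band (1 : Int) 3 = 1 := by decide
    have hf : PySem.Int.floordiv (1 : Int) 4 = 0 := by decide
    have hr : PySem.List.pyRange 0 0 4 = [] := by decide
    simp [pvCoreA, pvCoreB, pvStep, pvMixB, hb, hr, pvOrdAt_zero_cons, pvBor0, pvBxor0]
  | [a, b], hc, h1 => by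
    have ha : a.toNat < 256 := hc a (by simp)
    have hb3 : PySem.Int.band (2 : Int) 3 = 2 := by decide
    have hf : PySem.Int.floordiv (2 : Int) 4 = 0 := by decide
    have hr : PySem.List.pyRange 0 0 4 = [] := by decide
    have ho1 : pvOrdAt [a, b] 1 = (b.toNat : Int) := by
      have h := pvOrdAt_natCast [a, b] 1
      simpa [pvOrdN] using h
    simp [pvCoreA, pvCoreB, pvStep, pvMixB, hb3, hr, pvOrdAt_zero_cons, ho1, pvBor0, pvBxor0,
      pvTail2I a b ha]
  | [a, b, c], hc, h1 => by
    have ha : a.toNat < 256 := hc a (by simp)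
    have hbb : b.toNat < 256 := hc b (by simp)
    have hb3 : PySem.Int.band (3 : Int) 3 = 3 := by decide
    have hf : PySem.Int.floordiv (3 : Int) 4 = 0 := by decide
    have hr : PySem.List.pyRange 0 0 4 = [] := by decide
    have ho1 : pvOrdAt [a, b, c] 1 = (b.toNat : Int) := by
      have h := pvOrdAt_natCast [a, b, c] 1
      simpa [pvOrdN] using h
    have ho2 : pvOrdAt [a, b, c] 2 = (c.toNat : Int) := by
      have h := pvOrdAt_natCast [a, b, c] 2
      simpa [pvOrdN] using h
    simp [pvCoreA, pvCoreB, pvStep, pvMixB, hr, pvOrdAt_zero_cons, ho1, ho2, pvBor0, pvBxor0,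
      pvTail3I a b c ha hbb]
  | a :: b :: c :: d :: t, hc, h1 => by
    rw [pvCoreA_cons4, pvCoreB_cons4, pvFirstBlock,
      pvCore_eq t (fun x hx => hc x (by simp [hx]))]

-- ===== VERDICT (by name: the statement is the Claim_ definition above) =====
theorem mmh3_hash_spec : Claim_equal_mmh3_hash := by
  intro s m seed hdom _
  unfold Spec_mmh3_hash
  rw [portA_eq, portB_eq, pvCore_eq]
  intro c hc
  have hstr : pvDomStr s = true := by
    unfold Dom_mmh3_hash at hdom
    simp only [Bool.and_eq_true] at hdom
    exact hdom.1.1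
  have hch : pvDomChar c = true := (List.all_eq_true.mp hstr) c hc
  simp only [pvDomChar, Bool.or_eq_true, Bool.and_eq_true, decide_eq_true_eq, beq_iff_eq] at hch
  omega
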